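-- pv_equiv track=rewrite | github.com/PAMF2/LASTRO | tools/analytics.py | _agrupar_horarios
-- ===== SOURCE A (Python) =====
-- from typing import Dict, Any, List
--
-- def _agrupar_horarios(horarios: List[int]) -> List[str]:
--     """Agrupa horários em faixas"""
--     faixas = {
--         "08:00-10:00": 0,
--         "10:00-12:00": 0,
--         "12:00-14:00": 0,
--         "14:00-16:00": 0,
--         "16:00-18:00": 0,
--         "18:00-20:00": 0,
--         "20:00-22:00": 0,
--     }
--
--     for hora in horarios:
--         if 8 <= hora < 10:
--             faixas["08:00-10:00"] += 1
--         elif 10 <= hora < 12: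
--             faixas["10:00-12:00"] += 1
--         elif 12 <= hora < 14:
--             faixas["12:00-14:00"] += 1
--         elif 14 <= hora < 16:
--             faixas["14:00-16:00"] += 1
--         elif 16 <= hora < 18:
--             faixas["16:00-18:00"] += 1
--         elif 18 <= hora < 20:
--             faixas["18:00-20:00"] += 1
--         elif 20 <= hora < 22:
--             faixas["20:00-22:00"] += 1
--
--     # Retorna top 2 faixas
--     faixas_ordenadas = sorted(faixas.items(), key=lambda x: x[1], reverse=True)
--     return [f[0] for f in faixas_ordenadas[:2] if f[1] > 0]
-- ===== SOURCE B (Python) =====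
-- def _agrupar_horarios(horarios):
--     """Agrupa horários em faixas"""
--     labels = ["08:00-10:00", "10:00-12:00", "12:00-14:00", "14:00-16:00",
--               "16:00-18:00", "18:00-20:00", "20:00-22:00"]
--     # one count per bucket, each by its own scan
--     counts = [sum(1 for h in horarios if 8 + 2 * i <= h < 10 + 2 * i)
--               for i in range(7)]
--     # top-2 by selection (no sort): max() returns the FIRST maximal index,
--     # which matches the stable descending order on ties
--     best = max(range(7), key=lambda i: counts[i])
--     result = []
--     if counts[best] > 0:
--         result.append(labels[best])
--         second = max((i for i in range(7) if i != best), key=lambda i: counts[i])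
--         if counts[second] > 0:
--             result.append(labels[second])
--     return result
-- ===== Notes on version B (the rewrite author's own statement) =====
-- stated objective: alternative
-- what changed: Drops the sort and the dict entirely: B counts each of the 7 buckets by its own arithmetic-range scan and picks the top two by max()-selection (first maximal index, then first maximal among the remaining indices), instead of A's single elif/dict classification pass followed by a stable descending sort of the dict items.
import Mathlib
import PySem

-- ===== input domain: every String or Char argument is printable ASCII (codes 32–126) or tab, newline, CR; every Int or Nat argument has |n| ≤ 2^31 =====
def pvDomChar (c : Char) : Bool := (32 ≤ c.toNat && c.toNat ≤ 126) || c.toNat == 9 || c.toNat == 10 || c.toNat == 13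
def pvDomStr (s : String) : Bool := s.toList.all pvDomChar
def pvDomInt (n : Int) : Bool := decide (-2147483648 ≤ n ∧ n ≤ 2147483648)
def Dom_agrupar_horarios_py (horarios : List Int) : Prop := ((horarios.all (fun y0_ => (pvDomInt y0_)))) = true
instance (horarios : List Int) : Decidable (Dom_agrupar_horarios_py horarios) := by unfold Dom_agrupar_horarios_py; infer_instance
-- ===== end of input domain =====

-- B replaces A's single-pass elif/dict classification + stable sort by seven per-bucket
-- counting passes and a sort-free top-2 selection with max() (objective: alternative).


-- ===== PORT A =====
-- loop body of A's 'for hora in horarios' (the elif chain; every key is present, so '+= 1' is Dict.modify)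
def pvStepA (d : PySem.Dict String Int) (hora : Int) : PySem.Dict String Int :=
  if 8 ≤ hora ∧ hora < 10 then d.modify "08:00-10:00" 0 (· + 1)
  else if 10 ≤ hora ∧ hora < 12 then d.modify "10:00-12:00" 0 (· + 1)
  else if 12 ≤ hora ∧ hora < 14 then d.modify "12:00-14:00" 0 (· + 1)
  else if 14 ≤ hora ∧ hora < 16 then d.modify "14:00-16:00" 0 (· + 1)
  else if 16 ≤ hora ∧ hora < 18 then d.modify "16:00-18:00" 0 (· + 1)
  else if 18 ≤ hora ∧ hora < 20 then d.modify "18:00-20:00" 0 (· + 1)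
  else if 20 ≤ hora ∧ hora < 22 then d.modify "20:00-22:00" 0 (· + 1)
  else d

def agrupar_horarios_py (horarios : List Int) : List String :=
  let faixas : PySem.Dict String Int := PySem.Dict.ofList
    [("08:00-10:00", 0), ("10:00-12:00", 0), ("12:00-14:00", 0), ("14:00-16:00", 0),
     ("16:00-18:00", 0), ("18:00-20:00", 0), ("20:00-22:00", 0)]
  let faixas := horarios.foldl pvStepA faixas
  let faixas_ordenadas := PySem.List.sorted faixas.items (fun x => x.2) true
  ((PySem.List.slice faixas_ordenadas none (some 2)).filter (fun f => decide (f.2 > 0))).map (fun f => f.1)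

-- ===== PORT B =====
def pvLabels : List String :=
  ["08:00-10:00", "10:00-12:00", "12:00-14:00", "14:00-16:00",
   "16:00-18:00", "18:00-20:00", "20:00-22:00"]

-- body of B's comprehension: 'sum(1 for h in horarios if 8 + 2*i <= h < 10 + 2*i)'
def pvCnt (horarios : List Int) (i : Int) : Int :=
  (horarios.map (fun h => if 8 + 2*i ≤ h ∧ h < 10 + 2*i then (1:Int) else 0)).sum

def agrupar_horarios_py_alt (horarios : List Int) : List String :=
  let counts : List Int := (PySem.List.pyRange 0 7 1).map (pvCnt horarios)
  -- best = max(range(7), key=...): Python max returns the FIRST maximal element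
  match PySem.List.max? (PySem.List.pyRange 0 7 1) (fun i => PySem.List.pyGetD counts i 0) with
  | none => []                                   -- unreachable: range(7) is nonempty
  | some best =>
    if PySem.List.pyGetD counts best 0 > 0 then
      match PySem.List.max? ((PySem.List.pyRange 0 7 1).filter (fun i => decide (i ≠ best)))
              (fun i => PySem.List.pyGetD counts i 0) with
      | none => [PySem.List.pyGetD pvLabels best ""]   -- unreachable: 6 indices remain
      | some second =>
        if PySem.List.pyGetD counts second 0 > 0 then
          [PySem.List.pyGetD pvLabels best "", PySem.List.pyGetD pvLabels second ""]
        else [PySem.List.pyGetD pvLabels best ""]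
    else []

-- ===== PRECONDITION & SPEC =====
def Spec_agrupar_horarios_py (horarios : List Int) (out : List String) : Prop := out = agrupar_horarios_py_alt horarios
instance (horarios : List Int) (out : List String) : Decidable (Spec_agrupar_horarios_py horarios out) := by unfold Spec_agrupar_horarios_py; infer_instance

-- ===== CLAIM (what is proved, stated in full; the proofs are below) =====
def Claim_equal_agrupar_horarios_py : Prop := ∀ (horarios : List Int), Dom_agrupar_horarios_py horarios → Spec_agrupar_horarios_py horarios (agrupar_horarios_py horarios)

-- ===== LEMMAS AND PROOFS =====

-- the dict A maintains, written from the 7 bucket counters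
def pvDictOf (c0 c1 c2 c3 c4 c5 c6 : Int) : PySem.Dict String Int :=
  PySem.Dict.mk [("08:00-10:00", c0), ("10:00-12:00", c1), ("12:00-14:00", c2), ("14:00-16:00", c3),
                 ("16:00-18:00", c4), ("18:00-20:00", c5), ("20:00-22:00", c6)]

lemma pvCnt_cons (h : Int) (t : List Int) (i : Int) :
    pvCnt (h :: t) i = (if 8 + 2*i ≤ h ∧ h < 10 + 2*i then (1:Int) else 0) + pvCnt t i := by
  simp [pvCnt]

-- A's loop, run from arbitrary counter values, adds B's per-bucket counts
lemma pvLoopA : ∀ (hs : List Int) (c0 c1 c2 c3 c4 c5 c6 : Int),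
    hs.foldl pvStepA (pvDictOf c0 c1 c2 c3 c4 c5 c6)
      = pvDictOf (c0 + pvCnt hs 0) (c1 + pvCnt hs 1) (c2 + pvCnt hs 2) (c3 + pvCnt hs 3)
                 (c4 + pvCnt hs 4) (c5 + pvCnt hs 5) (c6 + pvCnt hs 6) := by
  intro hs
  induction hs with
  | nil => intro c0 c1 c2 c3 c4 c5 c6; simp [pvCnt]
  | cons h t ih =>
    intro c0 c1 c2 c3 c4 c5 c6
    rw [List.foldl_cons]
    simp only [pvCnt_cons]
    by_cases h1 : 8 ≤ h ∧ h < 10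
    · have : pvStepA (pvDictOf c0 c1 c2 c3 c4 c5 c6) h = pvDictOf (c0+1) c1 c2 c3 c4 c5 c6 := by
        unfold pvStepA; rw [if_pos h1]; rfl
      rw [this, ih]
      rw [if_pos (by omega), if_neg (by omega), if_neg (by omega), if_neg (by omega),
          if_neg (by omega), if_neg (by omega), if_neg (by omega)]
      unfold pvDictOf; norm_num; ring
    · by_cases h2 : 10 ≤ h ∧ h < 12
      · have : pvStepA (pvDictOf c0 c1 c2 c3 c4 c5 c6) h = pvDictOf c0 (c1+1) c2 c3 c4 c5 c6 := by
          unfold pvStepA; rw [if_neg h1, if_pos h2]; rfl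
        rw [this, ih]
        rw [if_neg (by omega), if_pos (by omega), if_neg (by omega), if_neg (by omega),
            if_neg (by omega), if_neg (by omega), if_neg (by omega)]
        unfold pvDictOf; norm_num; ring
      · by_cases h3 : 12 ≤ h ∧ h < 14
        · have : pvStepA (pvDictOf c0 c1 c2 c3 c4 c5 c6) h = pvDictOf c0 c1 (c2+1) c3 c4 c5 c6 := by
            unfold pvStepA; rw [if_neg h1, if_neg h2, if_pos h3]; rfl
          rw [this, ih]
          rw [if_neg (by omega), if_neg (by omega), if_pos (by omega), if_neg (by omega),
              if_neg (by omega), if_neg (by omega), if_neg (by omega)]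
          unfold pvDictOf; norm_num; ring
        · by_cases h4 : 14 ≤ h ∧ h < 16
          · have : pvStepA (pvDictOf c0 c1 c2 c3 c4 c5 c6) h = pvDictOf c0 c1 c2 (c3+1) c4 c5 c6 := by
              unfold pvStepA; rw [if_neg h1, if_neg h2, if_neg h3, if_pos h4]; rfl
            rw [this, ih]
            rw [if_neg (by omega), if_neg (by omega), if_neg (by omega), if_pos (by omega),
                if_neg (by omega), if_neg (by omega), if_neg (by omega)]
            unfold pvDictOf; norm_num; ring
          · by_cases h5 : 16 ≤ h ∧ h < 18
            · have : pvStepA (pvDictOf c0 c1 c2 c3 c4 c5 c6) h = pvDictOf c0 c1 c2 c3 (c4+1) c5 c6 := by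
                unfold pvStepA; rw [if_neg h1, if_neg h2, if_neg h3, if_neg h4, if_pos h5]; rfl
              rw [this, ih]
              rw [if_neg (by omega), if_neg (by omega), if_neg (by omega), if_neg (by omega),
                  if_pos (by omega), if_neg (by omega), if_neg (by omega)]
              unfold pvDictOf; norm_num; ring
            · by_cases h6 : 18 ≤ h ∧ h < 20
              · have : pvStepA (pvDictOf c0 c1 c2 c3 c4 c5 c6) h = pvDictOf c0 c1 c2 c3 c4 (c5+1) c6 := by
                  unfold pvStepA; rw [if_neg h1, if_neg h2, if_neg h3, if_neg h4, if_neg h5, if_pos h6]; rfl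
                rw [this, ih]
                rw [if_neg (by omega), if_neg (by omega), if_neg (by omega), if_neg (by omega),
                    if_neg (by omega), if_pos (by omega), if_neg (by omega)]
                unfold pvDictOf; norm_num; ring
              · by_cases h7 : 20 ≤ h ∧ h < 22
                · have : pvStepA (pvDictOf c0 c1 c2 c3 c4 c5 c6) h = pvDictOf c0 c1 c2 c3 c4 c5 (c6+1) := by
                    unfold pvStepA; rw [if_neg h1, if_neg h2, if_neg h3, if_neg h4, if_neg h5, if_neg h6, if_pos h7]; rfl
                  rw [this, ih]
                  rw [if_neg (by omega), if_neg (by omega), if_neg (by omega), if_neg (by omega),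
                      if_neg (by omega), if_neg (by omega), if_pos (by omega)]
                  unfold pvDictOf; norm_num; ring
                · have : pvStepA (pvDictOf c0 c1 c2 c3 c4 c5 c6) h = pvDictOf c0 c1 c2 c3 c4 c5 c6 := by
                    unfold pvStepA; rw [if_neg h1, if_neg h2, if_neg h3, if_neg h4, if_neg h5, if_neg h6, if_neg h7]
                  rw [this, ih]
                  rw [if_neg (by omega), if_neg (by omega), if_neg (by omega), if_neg (by omega),
                      if_neg (by omega), if_neg (by omega), if_neg (by omega)]
                  norm_num

-- sorted of a snoc is one insertion into the sorted prefix (reverse=True comparator)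
lemma pvSortedSnoc {α κ : Type} [LT κ] [DecidableLT κ] (key : α → κ) (s : List α) (x : α) :
    PySem.List.sorted (s ++ [x]) key true
      = PySem.List.insertBy (fun a b => decide (key b < key a)) x (PySem.List.sorted s key true) := by
  rw [PySem.List.sorted_rev_eq_foldl_insertBy, PySem.List.sorted_rev_eq_foldl_insertBy,
      List.foldl_append]
  rfl

-- max? of a snoc is one comparison against max? of the prefix
lemma pvMaxSnoc {α κ : Type} [LT κ] [DecidableLT κ] (key : α → κ) (t : List α) (x : α) :
    PySem.List.max? (t ++ [x]) key
      = match PySem.List.max? t key with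
        | none => some x
        | some m => if key m < key x then some x else some m := by
  simp only [PySem.List.max?, List.foldl_append, List.foldl_cons, List.foldl_nil]
  rfl

-- stable descending sort = first maximal element :: stable descending sort of the rest
lemma pvSelHead {α κ : Type} [DecidableEq α] [LinearOrder κ] (key : α → κ) :
    ∀ (l : List α), l.Nodup → ∀ m, PySem.List.max? l key = some m →
      PySem.List.sorted l key true
        = m :: PySem.List.sorted (l.filter (fun y => decide (y ≠ m))) key true := by
  intro l
  induction l using List.reverseRecOn with
  | nil => intro _ m hm; simp [PySem.List.max?] at hm
  | append_singleton t x ih =>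
    intro hnd m hm
    obtain ⟨hndt, _, hdisj⟩ := List.nodup_append.mp hnd
    have hxnott : x ∉ t := fun hx => hdisj x hx x (by simp) rfl
    rw [pvMaxSnoc] at hm
    cases ht : PySem.List.max? t key with
    | none =>
      have htnil : t = [] := (PySem.List.max?_eq_none_iff _ _).mp ht
      subst htnil
      rw [ht] at hm
      simp only at hm
      cases hm
      simp [PySem.List.sorted, PySem.List.insertBy, List.filter]
    | some m' =>
      rw [ht] at hm
      simp only at hm
      have hmem' : m' ∈ t := PySem.List.max?_mem ht
      by_cases hlt : key m' < key x
      · rw [if_pos hlt] at hm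
        cases hm
        rw [pvSortedSnoc, ih hndt m' ht]
        have hfx : List.filter (fun y => decide (y ≠ x)) (t ++ [x]) = t := by
          rw [List.filter_append]
          have h1 : List.filter (fun y => decide (y ≠ x)) t = t :=
            List.filter_eq_self.mpr (fun y hy => by
              simp only [decide_eq_true_eq]
              exact fun he => hxnott (he ▸ hy))
          have h2 : List.filter (fun y => decide (y ≠ x)) [x] = [] := by simp
          rw [h1, h2, List.append_nil]
        rw [hfx]
        have : PySem.List.insertBy (fun a b => decide (key b < key a)) x
            (m' :: PySem.List.sorted (List.filter (fun y => decide (y ≠ m')) t) key true)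
            = x :: m' :: PySem.List.sorted (List.filter (fun y => decide (y ≠ m')) t) key true := by
          simp [PySem.List.insertBy, hlt]
        rw [this, ← ih hndt m' ht]
      · rw [if_neg hlt] at hm
        cases hm
        rw [pvSortedSnoc, ih hndt m ht]
        have hxm : x ≠ m := fun he => hxnott (he ▸ hmem')
        have step : PySem.List.insertBy (fun a b => decide (key b < key a)) x
            (m :: PySem.List.sorted (List.filter (fun y => decide (y ≠ m)) t) key true)
            = m :: PySem.List.insertBy (fun a b => decide (key b < key a)) x
                (PySem.List.sorted (List.filter (fun y => decide (y ≠ m)) t) key true) := by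
          simp [PySem.List.insertBy, hlt]
        rw [step, ← pvSortedSnoc]
        have hfx : List.filter (fun y => decide (y ≠ m)) (t ++ [x])
            = List.filter (fun y => decide (y ≠ m)) t ++ [x] := by
          rw [List.filter_append]
          simp [hxm]
        rw [hfx]

-- max? with a key factored through a map
lemma pvMaxMapAux {α β κ : Type} [LT κ] [DecidableLT κ] (f : α → β) (key : β → κ) :
    ∀ (l : List α) (acc : Option α),
      (l.map f).foldl
          (fun acc x => match acc with
            | none => some x
            | some m => if key m < key x then some x else some m) (acc.map f)
        = (l.foldl
            (fun acc x => match acc with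
              | none => some x
              | some m => if key (f m) < key (f x) then some x else some m) acc).map f := by
  intro l
  induction l with
  | nil => intro acc; rfl
  | cons a l ih =>
    intro acc
    simp only [List.map_cons, List.foldl_cons]
    have : (match acc.map f with
        | none => some (f a)
        | some m => if key m < key (f a) then some (f a) else some m)
        = (match acc with
            | none => some a
            | some m => if key (f m) < key (f a) then some a else some m).map f := by
      cases acc with
      | none => rfl
      | some m => by_cases h : key (f m) < key (f a) <;> simp [h]
    rw [this, ih]

lemma pvMaxMap {α β κ : Type} [LT κ] [DecidableLT κ] (f : α → β) (key : β → κ) (l : List α) :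
    PySem.List.max? (l.map f) key = (PySem.List.max? l (fun a => key (f a))).map f := by
  simpa [PySem.List.max?] using pvMaxMapAux f key l none

-- the labels determine the index, over 0..6
lemma pvLabelInj : ∀ i ∈ ([0, 1, 2, 3, 4, 5, 6] : List Int), ∀ j ∈ ([0, 1, 2, 3, 4, 5, 6] : List Int),
    PySem.List.pyGetD pvLabels i "" = PySem.List.pyGetD pvLabels j "" → i = j := by
  intro i hi j hj h
  fin_cases hi <;> fin_cases hj <;> simp_all [pvLabels, PySem.List.pyGetD]

-- abbreviations for the proof: the index list, B's key, and the item a bucket index names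
def pvIdx : List Int := [0, 1, 2, 3, 4, 5, 6]

def pvKeyB (horarios : List Int) (i : Int) : Int :=
  PySem.List.pyGetD (pvIdx.map (pvCnt horarios)) i 0

def pvF (horarios : List Int) (i : Int) : String × Int :=
  (PySem.List.pyGetD pvLabels i "", pvKeyB horarios i)

lemma pvItems (hs : List Int) :
    (pvDictOf (pvCnt hs 0) (pvCnt hs 1) (pvCnt hs 2) (pvCnt hs 3) (pvCnt hs 4) (pvCnt hs 5)
        (pvCnt hs 6)).items = pvIdx.map (pvF hs) := rfl

lemma pvNodupItems (hs : List Int) : (pvIdx.map (pvF hs)).Nodup := by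
  simp [pvIdx, pvF, pvLabels, List.nodup_cons, Prod.ext_iff, PySem.List.pyGetD]

lemma pvFilterMap (hs : List Int) (best : Int) (hb : best ∈ pvIdx) :
    (pvIdx.map (pvF hs)).filter (fun y => decide (y ≠ pvF hs best))
      = (pvIdx.filter (fun i => decide (i ≠ best))).map (pvF hs) := by
  rw [List.filter_map]
  congr 1
  apply List.filter_congr
  intro i hi
  simp only [Function.comp_apply, decide_eq_decide]
  constructor
  · intro hne he; exact hne (by rw [he])
  · intro hne he
    exact hne (pvLabelInj i hi best hb (congrArg Prod.fst he))

theorem agrupar_horarios_py_spec : Claim_equal_agrupar_horarios_py := by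
  intro horarios _
  show agrupar_horarios_py horarios = agrupar_horarios_py_alt horarios
  unfold agrupar_horarios_py agrupar_horarios_py_alt
  have hrange : PySem.List.pyRange 0 7 1 = pvIdx := rfl
  have hinit : (PySem.Dict.ofList
      [("08:00-10:00", (0:Int)), ("10:00-12:00", 0), ("12:00-14:00", 0), ("14:00-16:00", 0),
       ("16:00-18:00", 0), ("18:00-20:00", 0), ("20:00-22:00", 0)]) = pvDictOf 0 0 0 0 0 0 0 := rfl
  simp only [hrange, hinit, pvLoopA, zero_add, pvItems]
  -- B's outer max: range(7) is nonempty, so it is some best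
  cases hbest : PySem.List.max? pvIdx (fun i => PySem.List.pyGetD (pvIdx.map (pvCnt horarios)) i 0) with
  | none => exact absurd ((PySem.List.max?_eq_none_iff _ _).mp hbest) (by decide)
  | some best =>
    dsimp only
    have hbest' : PySem.List.max? pvIdx (pvKeyB horarios) = some best := hbest
    have hbmem : best ∈ pvIdx := PySem.List.max?_mem hbest'
    have hAmax : PySem.List.max? (pvIdx.map (pvF horarios)) (fun x => x.2) = some (pvF horarios best) := by
      rw [pvMaxMap]
      have : PySem.List.max? pvIdx (fun a => (pvF horarios a).2) = some best := hbest'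
      rw [this]; rfl
    rw [pvSelHead (fun x => x.2) (pvIdx.map (pvF horarios)) (pvNodupItems horarios)
        (pvF horarios best) hAmax, pvFilterMap horarios best hbmem]
    -- the inner max: six indices remain, so it is some second
    have hne2 : (pvIdx.filter (fun i => decide (i ≠ best))) ≠ [] := by
      by_cases hb0 : best = (0:Int)
      · subst hb0
        have h1mem : (1:Int) ∈ pvIdx.filter (fun i => decide (i ≠ (0:Int))) := by decide
        exact List.ne_nil_of_mem h1mem
      · have h0mem : (0:Int) ∈ pvIdx.filter (fun i => decide (i ≠ best)) :=
          List.mem_filter.mpr ⟨by decide, decide_eq_true (fun h => hb0 h.symm)⟩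
        exact List.ne_nil_of_mem h0mem
    cases hsec : PySem.List.max? (pvIdx.filter (fun i => decide (i ≠ best)))
        (fun i => PySem.List.pyGetD (pvIdx.map (pvCnt horarios)) i 0) with
    | none => exact absurd ((PySem.List.max?_eq_none_iff _ _).mp hsec) hne2
    | some second =>
      dsimp only
      have hsec' : PySem.List.max? (pvIdx.filter (fun i => decide (i ≠ best)))
          (pvKeyB horarios) = some second := hsec
      have hsmem2 : second ∈ pvIdx.filter (fun i => decide (i ≠ best)) := PySem.List.max?_mem hsec'
      have hsmem : second ∈ pvIdx := (List.mem_filter.mp hsmem2).1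
      have hnd2 : ((pvIdx.filter (fun i => decide (i ≠ best))).map (pvF horarios)).Nodup := by
        rw [← pvFilterMap horarios best hbmem]
        exact (pvNodupItems horarios).filter _
      have hAmax2 : PySem.List.max? ((pvIdx.filter (fun i => decide (i ≠ best))).map (pvF horarios))
          (fun x => x.2) = some (pvF horarios second) := by
        rw [pvMaxMap]
        have : PySem.List.max? (pvIdx.filter (fun i => decide (i ≠ best)))
            (fun a => (pvF horarios a).2) = some second := hsec'
        rw [this]; rfl
      rw [pvSelHead (fun x => x.2) ((pvIdx.filter (fun i => decide (i ≠ best))).map (pvF horarios))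
          hnd2 (pvF horarios second) hAmax2]
      -- A's pipeline on the two heads
      have hsl : ∀ (xs : List (String × Int)), PySem.List.slice xs none (some 2) = xs.take 2 := by
        intro xs
        exact_mod_cast PySem.List.slice_to_natCast xs 2
      rw [hsl]
      have hle : pvKeyB horarios second ≤ pvKeyB horarios best :=
        PySem.List.max?_isMax hbest' second hsmem
      by_cases h1 : 0 < PySem.List.pyGetD (pvIdx.map (pvCnt horarios)) best 0
      · by_cases h2 : 0 < PySem.List.pyGetD (pvIdx.map (pvCnt horarios)) second 0
        · simp [pvF, pvKeyB, List.filter, List.take, h1, h2]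
        · simp [pvF, pvKeyB, List.filter, List.take, h1, h2]
      · have h2 : ¬ 0 < PySem.List.pyGetD (pvIdx.map (pvCnt horarios)) second 0 := by
          simp only [pvKeyB] at hle
          omega
        simp [pvF, pvKeyB, List.filter, List.take, h1, h2]
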